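-- pv_equiv track=rewrite | github.com/GautamSai05/stellarX | profiles/management/commands/fetch_space_weather.py | _parse_alert_message
-- ===== SOURCE A (Python) =====
-- def _parse_alert_message(message):
--     """Parse alert message to determine type, severity, and target audiences"""
--     message_lower = message.lower()
--
--     alert_type = None
--     severity = 'R1'
--     targets = {
--         'relevant_for_farmers': False,
--         'relevant_for_pilots': False,
--         'relevant_for_stargazers': False,
--         'relevant_for_educators': False,
--         'relevant_for_general': True,
--     }
--
--     # Determine alert type
--     if 'radio blackout' in message_lower or 'r2' in message_lower or 'r3' in message_lower:
--         alert_type = 'radio_blackout'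
--         targets['relevant_for_farmers'] = True
--         targets['relevant_for_pilots'] = True
--         targets['relevant_for_educators'] = True
--
--         # Extract severity
--         for level in ['R5', 'R4', 'R3', 'R2', 'R1']:
--             if level.lower() in message_lower:
--                 severity = level
--                 break
--
--     elif 'geomagnetic storm' in message_lower or 'aurora' in message_lower:
--         alert_type = 'geomagnetic_storm'
--         targets['relevant_for_stargazers'] = True
--         targets['relevant_for_educators'] = True
--
--         for level in ['G5', 'G4', 'G3', 'G2', 'G1']:
--             if level.lower() in message_lower:
--                 severity = level
--                 break
--
--     elif 'solar flare' in message_lower or 'x-ray' in message_lower: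
--         alert_type = 'solar_flare'
--         targets['relevant_for_farmers'] = True
--         targets['relevant_for_pilots'] = True
--         targets['relevant_for_stargazers'] = True
--         targets['relevant_for_educators'] = True
--
--         if 'x-class' in message_lower or 'x class' in message_lower:
--             severity = 'X'
--         elif 'm-class' in message_lower or 'm class' in message_lower:
--             severity = 'M'
--
--     elif 'radiation' in message_lower and 'storm' in message_lower:
--         alert_type = 'solar_radiation'
--         targets['relevant_for_pilots'] = True
--         targets['relevant_for_educators'] = True
--
--     return alert_type, severity, targets
-- ===== SOURCE B (Python) =====
-- # Table-driven rewrite: the if/elif cascade becomes a first-match scan over rule records.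
-- RULES = [
--     ((False, ['radio blackout', 'r2', 'r3']), 'radio_blackout',
--      ('farmers', 'pilots', 'educators'), ['R5', 'R4', 'R3', 'R2', 'R1']),
--     ((False, ['geomagnetic storm', 'aurora']), 'geomagnetic_storm',
--      ('stargazers', 'educators'), ['G5', 'G4', 'G3', 'G2', 'G1']),
--     ((False, ['solar flare', 'x-ray']), 'solar_flare',
--      ('farmers', 'pilots', 'stargazers', 'educators'), 'flare'),
--     ((True, ['radiation', 'storm']), 'solar_radiation',
--      ('pilots', 'educators'), None),
-- ]
--
--
-- def _severity(ml, spec):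
--     if spec is None:
--         return 'R1'
--     if spec == 'flare':
--         if 'x-class' in ml or 'x class' in ml:
--             return 'X'
--         if 'm-class' in ml or 'm class' in ml:
--             return 'M'
--         return 'R1'
--     return next((lvl for lvl in spec if lvl.lower() in ml), 'R1')
--
--
-- def _parse_alert_message(message):
--     ml = message.lower()
--     alert_type, severity, on = None, 'R1', ()
--     for (all_required, keywords), name, flags, spec in RULES:
--         hits = (kw in ml for kw in keywords)
--         if all(hits) if all_required else any(hits):
--             alert_type, severity, on = name, _severity(ml, spec), flags
--             break
--     return alert_type, severity, {
--         'relevant_for_farmers': 'farmers' in on,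
--         'relevant_for_pilots': 'pilots' in on,
--         'relevant_for_stargazers': 'stargazers' in on,
--         'relevant_for_educators': 'educators' in on,
--         'relevant_for_general': True,
--     }
-- ===== Notes on version B (the rewrite author's own statement) =====
-- stated objective: simpler
-- what changed: The inline if/elif cascade with per-branch dict mutation is replaced by a first-match scan over an ordered table of rule records (trigger keywords with an any/all flag, target flags, severity spec), with severity resolved from the matched rule's spec.
import Mathlib
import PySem

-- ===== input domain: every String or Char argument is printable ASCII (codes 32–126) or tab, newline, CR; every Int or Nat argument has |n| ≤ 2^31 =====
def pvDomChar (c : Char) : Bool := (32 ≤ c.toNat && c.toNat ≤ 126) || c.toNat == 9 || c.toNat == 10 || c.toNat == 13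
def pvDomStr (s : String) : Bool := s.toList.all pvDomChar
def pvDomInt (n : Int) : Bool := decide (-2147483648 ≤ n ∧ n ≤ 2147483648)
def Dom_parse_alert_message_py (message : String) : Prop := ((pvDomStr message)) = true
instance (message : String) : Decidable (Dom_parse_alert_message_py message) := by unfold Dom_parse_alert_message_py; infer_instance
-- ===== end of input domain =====

-- B replaces A's inline if/elif cascade by a first-match scan over a table of rule records (simpler, same cost).

-- ===== PORT A =====
-- the 'for level in [...]: if level.lower() in ml: severity = level; break' loop, carrying the current severity
def pvScanA (ml : String) : List String → String → String
  | [], sev => sev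
  | l :: ls, sev => if PySem.Str.isIn (PySem.Str.lower l) ml then l else pvScanA ml ls sev

def parse_alert_message_py (message : String) : Option String × String × (List (String × Bool)) :=
  let ml := PySem.Str.lower message
  let alert_type : Option String := none
  let severity : String := "R1"
  let targets : PySem.Dict String Bool :=
    ((((PySem.Dict.empty.insert "relevant_for_farmers" false).insert "relevant_for_pilots" false).insert
        "relevant_for_stargazers" false).insert "relevant_for_educators" false).insert "relevant_for_general" true
  if PySem.Str.isIn "radio blackout" ml || PySem.Str.isIn "r2" ml || PySem.Str.isIn "r3" ml then
    let targets := ((targets.insert "relevant_for_farmers" true).insert "relevant_for_pilots" true).insert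
      "relevant_for_educators" true
    let severity := pvScanA ml ["R5", "R4", "R3", "R2", "R1"] severity
    (some "radio_blackout", severity, targets.items)
  else if PySem.Str.isIn "geomagnetic storm" ml || PySem.Str.isIn "aurora" ml then
    let targets := (targets.insert "relevant_for_stargazers" true).insert "relevant_for_educators" true
    let severity := pvScanA ml ["G5", "G4", "G3", "G2", "G1"] severity
    (some "geomagnetic_storm", severity, targets.items)
  else if PySem.Str.isIn "solar flare" ml || PySem.Str.isIn "x-ray" ml then
    let targets := (((targets.insert "relevant_for_farmers" true).insert "relevant_for_pilots" true).insert
      "relevant_for_stargazers" true).insert "relevant_for_educators" true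
    let severity :=
      if PySem.Str.isIn "x-class" ml || PySem.Str.isIn "x class" ml then "X"
      else if PySem.Str.isIn "m-class" ml || PySem.Str.isIn "m class" ml then "M"
      else severity
    (some "solar_flare", severity, targets.items)
  else if PySem.Str.isIn "radiation" ml && PySem.Str.isIn "storm" ml then
    let targets := (targets.insert "relevant_for_pilots" true).insert "relevant_for_educators" true
    (some "solar_radiation", severity, targets.items)
  else
    (alert_type, severity, targets.items)

-- ===== PORT B =====
-- severity spec of a rule: a list of levels to scan, the flare x/m logic, or the fixed default
inductive PvSevSpec
  | levels : List String → PvSevSpec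
  | flare : PvSevSpec
  | fixed : PvSevSpec
deriving DecidableEq, Repr

-- the RULES table: (all_required, keywords), name, target flags, severity spec
def pvRules : List ((Bool × List String) × String × List String × PvSevSpec) :=
  [((false, ["radio blackout", "r2", "r3"]), "radio_blackout",
      ["farmers", "pilots", "educators"], PvSevSpec.levels ["R5", "R4", "R3", "R2", "R1"]),
   ((false, ["geomagnetic storm", "aurora"]), "geomagnetic_storm",
      ["stargazers", "educators"], PvSevSpec.levels ["G5", "G4", "G3", "G2", "G1"]),
   ((false, ["solar flare", "x-ray"]), "solar_flare",
      ["farmers", "pilots", "stargazers", "educators"], PvSevSpec.flare),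
   ((true, ["radiation", "storm"]), "solar_radiation",
      ["pilots", "educators"], PvSevSpec.fixed)]

def pvSeverity (ml : String) : PvSevSpec → String
  | PvSevSpec.fixed => "R1"
  | PvSevSpec.flare =>
    if PySem.Str.isIn "x-class" ml || PySem.Str.isIn "x class" ml then "X"
    else if PySem.Str.isIn "m-class" ml || PySem.Str.isIn "m class" ml then "M"
    else "R1"
  | PvSevSpec.levels ls => (ls.find? (fun lvl => PySem.Str.isIn (PySem.Str.lower lvl) ml)).getD "R1"

def parse_alert_message_py_alt (message : String) : Option String × String × (List (String × Bool)) :=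
  let ml := PySem.Str.lower message
  let hit := pvRules.find? (fun r =>
    if r.1.1 then r.1.2.all (fun kw => PySem.Str.isIn kw ml)
    else r.1.2.any (fun kw => PySem.Str.isIn kw ml))
  let res : Option String × String × List String :=
    match hit with
    | some r => (some r.2.1, pvSeverity ml r.2.2.2, r.2.2.1)
    | none => (none, "R1", [])
  (res.1, res.2.1,
    [("relevant_for_farmers", res.2.2.contains "farmers"),
     ("relevant_for_pilots", res.2.2.contains "pilots"),
     ("relevant_for_stargazers", res.2.2.contains "stargazers"),
     ("relevant_for_educators", res.2.2.contains "educators"),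
     ("relevant_for_general", true)])

-- ===== PRECONDITION & SPEC =====
def Spec_parse_alert_message_py (message : String) (out : Option String × String × (List (String × Bool))) : Prop := out = parse_alert_message_py_alt message
instance (message : String) (out : Option String × String × (List (String × Bool))) : Decidable (Spec_parse_alert_message_py message out) := by unfold Spec_parse_alert_message_py; infer_instance

-- ===== CLAIM (what is proved, stated in full; the proofs are below) =====
def Claim_equal_parse_alert_message_py : Prop := ∀ (message : String), Dom_parse_alert_message_py message → Spec_parse_alert_message_py message (parse_alert_message_py message)

-- ===== LEMMAS AND PROOFS =====
-- A's break-loop over the severity levels computes the first match with default "R1"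
theorem pvScanA_eq (ml : String) (ls : List String) :
    pvScanA ml ls "R1" = (ls.find? (fun lvl => PySem.Str.isIn (PySem.Str.lower lvl) ml)).getD "R1" := by
  induction ls with
  | nil => rfl
  | cons l ls ih =>
    cases h : PySem.Str.isIn (PySem.Str.lower l) ml with
    | true => simp only [pvScanA, List.find?, h, if_true, Option.getD_some]
    | false => simp only [pvScanA, List.find?, h, if_false, ih, Bool.false_eq_true]

-- ===== VERDICT (by name: the statement is the Claim_ definition above) =====
set_option maxHeartbeats 2000000 in
theorem parse_alert_message_py_spec : Claim_equal_parse_alert_message_py := by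
  intro message _
  unfold Spec_parse_alert_message_py parse_alert_message_py parse_alert_message_py_alt
  generalize PySem.Str.lower message = ml
  cases h1 : PySem.Str.isIn "radio blackout" ml with
  | true => simp at h1; (simp [pvRules, pvSeverity, pvScanA_eq, h1]) <;> decide
  | false =>
  cases h2 : PySem.Str.isIn "r2" ml with
  | true => simp at h1 h2; (simp [pvRules, pvSeverity, pvScanA_eq, h1, h2]) <;> decide
  | false =>
  cases h3 : PySem.Str.isIn "r3" ml with
  | true => simp at h1 h2 h3; (simp [pvRules, pvSeverity, pvScanA_eq, h1, h2, h3]) <;> decide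
  | false =>
  cases h4 : PySem.Str.isIn "geomagnetic storm" ml with
  | true => simp at h1 h2 h3 h4; (simp [pvRules, pvSeverity, pvScanA_eq, h1, h2, h3, h4]) <;> decide
  | false =>
  cases h5 : PySem.Str.isIn "aurora" ml with
  | true => simp at h1 h2 h3 h4 h5; (simp [pvRules, pvSeverity, pvScanA_eq, h1, h2, h3, h4, h5]) <;> decide
  | false =>
  cases h6 : PySem.Str.isIn "solar flare" ml with
  | true =>
    simp at h1 h2 h3 h4 h5 h6
    (simp [pvRules, pvSeverity, pvScanA_eq, h1, h2, h3, h4, h5, h6]) <;> decide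
  | false =>
  cases h7 : PySem.Str.isIn "x-ray" ml with
  | true =>
    simp at h1 h2 h3 h4 h5 h6 h7
    (simp [pvRules, pvSeverity, pvScanA_eq, h1, h2, h3, h4, h5, h6, h7]) <;> decide
  | false =>
  cases h8 : PySem.Str.isIn "radiation" ml with
  | false =>
    simp at h1 h2 h3 h4 h5 h6 h7 h8
    (simp [pvRules, pvSeverity, pvScanA_eq, h1, h2, h3, h4, h5, h6, h7, h8]) <;> decide
  | true =>
  cases h9 : PySem.Str.isIn "storm" ml with
  | true =>
    simp at h1 h2 h3 h4 h5 h6 h7 h8 h9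
    (simp [pvRules, pvSeverity, pvScanA_eq, h1, h2, h3, h4, h5, h6, h7, h8, h9]) <;> decide
  | false =>
    simp at h1 h2 h3 h4 h5 h6 h7 h8 h9
    (simp [pvRules, pvSeverity, pvScanA_eq, h1, h2, h3, h4, h5, h6, h7, h8, h9]) <;> decide
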